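-- pv_equiv track=rewrite | github.com/m-quang/BaitapATBMTT | Utils.py | TextToDecimal
-- ===== SOURCE A (Python) =====
-- def ToDecimal(list: list) -> int:
--     newList = []
--     dec = 0
--     for i in range(0, len(list)):
--         newList.append(list[i] << (len(list) - i - 1) * 3)
--     for i in newList:
--         dec = dec | i
--     return dec
--
-- def TextToDecimal(text: str) -> int:
--     text = text.lower()
--     newText = []
--     for i in text:
--         match i:
--             case "a":
--                 newText.append(0)
--             case "b":
--                 newText.append(1)
--             case "c":
--                 newText.append(2)
--             case "d":
--                 newText.append(3)
--             case "e":
--                 newText.append(4)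
--             case "f":
--                 newText.append(5)
--             case "g":
--                 newText.append(6)
--             case "h":
--                 newText.append(7)
--             case _:
--                 raise "khong hop le!"
--
--     return ToDecimal(newText)
-- ===== SOURCE B (Python) =====
-- def TextToDecimal(text: str) -> int:
--     # One Horner-style multiply-accumulate pass; arithmetically identical to A's
--     # shift/OR packing because the 3-bit fields never overlap.
--     vals = {"a": 0, "b": 1, "c": 2, "d": 3, "e": 4, "f": 5, "g": 6, "h": 7}
--     result = 0
--     for ch in text.lower():
--         if ch not in vals:
--             raise "khong hop le!"
--         result = result * 8 + vals[ch]
--     return result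
-- ===== Notes on version B (the rewrite author's own statement) =====
-- stated objective: simpler
-- what changed: Replaces A's three passes (char-to-digit list build, per-index shift list build, OR-reduce helper) with a single Horner multiply-accumulate fold over the lowered text, using a dict instead of an 8-way match.
import Mathlib
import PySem

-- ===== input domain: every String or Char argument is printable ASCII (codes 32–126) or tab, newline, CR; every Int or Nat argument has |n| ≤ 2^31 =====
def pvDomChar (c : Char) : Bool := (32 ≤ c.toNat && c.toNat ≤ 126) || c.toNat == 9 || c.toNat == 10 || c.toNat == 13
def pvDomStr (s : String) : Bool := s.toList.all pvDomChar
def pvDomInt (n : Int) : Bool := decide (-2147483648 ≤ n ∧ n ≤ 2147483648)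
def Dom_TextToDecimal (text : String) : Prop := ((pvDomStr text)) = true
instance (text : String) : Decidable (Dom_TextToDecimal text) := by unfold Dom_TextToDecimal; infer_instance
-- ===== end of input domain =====

-- B replaces A's three passes (digit list, shifted list, OR-reduce helper) by one
-- Horner multiply-accumulate fold over the lowered text (objective: simpler).

-- ===== PORT A =====
-- A's match statement: 'a'..'h' ↦ 0..7; the default case raises (those inputs are
-- outside Pre_), the port returns 0 there (never reached inside Pre_)
def pvCharVal (c : Char) : Int :=
  if c = 'a' then 0 else if c = 'b' then 1 else if c = 'c' then 2 else
  if c = 'd' then 3 else if c = 'e' then 4 else if c = 'f' then 5 else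
  if c = 'g' then 6 else if c = 'h' then 7 else 0

-- helper ToDecimal, transliterated: build the shifted list, then OR-reduce.
-- (the shift amount (len-i-1)*3 is nonnegative for every index produced by range,
-- so .toNat is exact here)
def pvToDecimal (l : List Int) : Int :=
  let newList :=
    (PySem.List.pyRange 0 l.length 1).map
      (fun i => PySem.List.pyGetD l i 0 <<< (((l.length : Int) - i - 1) * 3).toNat)
  newList.foldl (fun dec i => PySem.Int.bor dec i) 0

def TextToDecimal (text : String) : Int :=
  let t := PySem.Chars.lower text.toList
  let newText := t.foldl (fun acc c => acc ++ [pvCharVal c]) []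
  pvToDecimal newText

-- ===== PORT B =====
def pvVals : PySem.Dict Char Int :=
  PySem.Dict.ofList [('a', 0), ('b', 1), ('c', 2), ('d', 3), ('e', 4), ('f', 5), ('g', 6), ('h', 7)]

-- the 'ch not in vals' branch raises (those inputs are outside Pre_);
-- the port looks up with default 0 (never used inside Pre_)
def TextToDecimal_alt (text : String) : Int :=
  (PySem.Chars.lower text.toList).foldl (fun result ch => result * 8 + pvVals.getD ch 0) 0

-- ===== PRECONDITION & SPEC =====
-- Pre_: exactly the inputs on which the Python A returns normally — every character
-- is a letter a..h in either case; on any other character both A and B raise.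
def Pre_TextToDecimal (text : String) : Prop :=
  (text.toList.all (fun c => "abcdefghABCDEFGH".toList.contains c)) = true
instance (text : String) : Decidable (Pre_TextToDecimal text) := by
  unfold Pre_TextToDecimal; infer_instance

def pvWitness_TextToDecimal : String := "Head"

def Spec_TextToDecimal (text : String) (out : Int) : Prop := out = TextToDecimal_alt text
instance (text : String) (out : Int) : Decidable (Spec_TextToDecimal text out) := by
  unfold Spec_TextToDecimal; infer_instance

-- ===== CLAIM (what is proved, stated in full; the proofs are below) =====
def Claim_equal_TextToDecimal : Prop :=
  ∀ (text : String), Dom_TextToDecimal text → Pre_TextToDecimal text →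
    Spec_TextToDecimal text (TextToDecimal text)

-- ===== LEMMAS AND PROOFS =====

-- Nat-valued digit, used only by the proofs
def pvCharValN (c : Char) : Nat :=
  if c = 'a' then 0 else if c = 'b' then 1 else if c = 'c' then 2 else
  if c = 'd' then 3 else if c = 'e' then 4 else if c = 'f' then 5 else
  if c = 'g' then 6 else if c = 'h' then 7 else 0

theorem pvCharVal_eq_cast (c : Char) : pvCharVal c = (pvCharValN c : Int) := by
  unfold pvCharVal pvCharValN; split_ifs <;> rfl

theorem pvCharValN_lt (c : Char) : pvCharValN c < 8 := by
  unfold pvCharValN; split_ifs <;> omega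

-- B's dict lookup agrees with A's match on every character (both default to 0)
theorem pvVals_getD (c : Char) : pvVals.getD c 0 = pvCharVal c := by
  by_cases h1 : c = 'a'; · subst h1; decide
  by_cases h2 : c = 'b'; · subst h2; decide
  by_cases h3 : c = 'c'; · subst h3; decide
  by_cases h4 : c = 'd'; · subst h4; decide
  by_cases h5 : c = 'e'; · subst h5; decide
  by_cases h6 : c = 'f'; · subst h6; decide
  by_cases h7 : c = 'g'; · subst h7; decide
  by_cases h8 : c = 'h'; · subst h8; decide
  have g1 : ('a' == c) = false := beq_eq_false_iff_ne.mpr (fun he => h1 he.symm)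
  have g2 : ('b' == c) = false := beq_eq_false_iff_ne.mpr (fun he => h2 he.symm)
  have g3 : ('c' == c) = false := beq_eq_false_iff_ne.mpr (fun he => h3 he.symm)
  have g4 : ('d' == c) = false := beq_eq_false_iff_ne.mpr (fun he => h4 he.symm)
  have g5 : ('e' == c) = false := beq_eq_false_iff_ne.mpr (fun he => h5 he.symm)
  have g6 : ('f' == c) = false := beq_eq_false_iff_ne.mpr (fun he => h6 he.symm)
  have g7 : ('g' == c) = false := beq_eq_false_iff_ne.mpr (fun he => h7 he.symm)
  have g8 : ('h' == c) = false := beq_eq_false_iff_ne.mpr (fun he => h8 he.symm)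
  have hd : pvVals = PySem.Dict.mk
      [('a', 0), ('b', 1), ('c', 2), ('d', 3), ('e', 4), ('f', 5), ('g', 6), ('h', 7)] := by decide
  rw [hd, PySem.Dict.getD_eq_get?_getD]
  simp [PySem.Dict.get?, pvCharVal, List.find?,
    g1, g2, g3, g4, g5, g6, g7, g8, h1, h2, h3, h4, h5, h6, h7, h8]

-- B's fold over characters is the Horner fold over the Nat digit list
theorem pv_alt_fold (cs : List Char) (a : Nat) :
    cs.foldl (fun result ch => result * 8 + pvVals.getD ch 0) (a : Int)
      = ((cs.map pvCharValN).foldl (fun r v => r * 8 + v) a : Nat) := by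
  induction cs generalizing a with
  | nil => rfl
  | cons c t ih =>
    rw [List.foldl_cons, List.map_cons, List.foldl_cons]
    rw [show ((a : Int) * 8 + pvVals.getD c 0) = ((a * 8 + pvCharValN c : Nat) : Int) by
      rw [pvVals_getD, pvCharVal_eq_cast]; push_cast; ring]
    exact ih (a * 8 + pvCharValN c)

-- casting an OR fold from Nat to Int
theorem pv_orfold_cast (xs : List Nat) (a : Nat) :
    (xs.map (fun (v : Nat) => (v : Int))).foldl (fun r v => PySem.Int.bor r v) (a : Int)
      = ((xs.foldl (fun r v => r ||| v) a : Nat) : Int) := by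
  induction xs generalizing a with
  | nil => rfl
  | cons d t ih =>
    simp only [List.map_cons, List.foldl_cons, PySem.Int.bor_natCast]
    exact ih (a ||| d)

-- the core identity: OR-reducing the non-overlapping 3-bit shifted fields is Horner
theorem pv_key (ds : List Nat) (hb : ∀ d ∈ ds, d < 8) (a : Nat) :
    ((List.range ds.length).map
        (fun i => ds.getD i 0 * 2 ^ (3 * (ds.length - 1 - i)))).foldl (· ||| ·) (a * 8 ^ ds.length)
      = ds.foldl (fun r v => r * 8 + v) a := by
  induction ds generalizing a with
  | nil => simp
  | cons d t ih =>
    have hd : d < 8 := hb d (by simp)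
    have hbt : ∀ x ∈ t, x < 8 := fun x hx => hb x (List.mem_cons_of_mem _ hx)
    have hlen : (d :: t).length = t.length + 1 := rfl
    rw [hlen, List.range_succ_eq_map, List.map_cons, List.map_map, List.foldl_cons]
    have hstep : a * 8 ^ (t.length + 1) ||| (d :: t).getD 0 0 * 2 ^ (3 * (t.length + 1 - 1 - 0))
        = (a * 8 + d) * 8 ^ t.length := by
      have h8 : (8 : Nat) ^ t.length = 2 ^ (3 * t.length) := by
        rw [show (8 : Nat) = 2 ^ 3 from rfl, ← pow_mul]
      have hlt : d * 2 ^ (3 * t.length) < 2 ^ (3 * (t.length + 1)) := by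
        calc d * 2 ^ (3 * t.length) < 8 * 2 ^ (3 * t.length) := by
              exact (Nat.mul_lt_mul_right (Nat.two_pow_pos _)).mpr hd
          _ = 2 ^ (3 * (t.length + 1)) := by
              rw [show 3 * (t.length + 1) = 3 * t.length + 3 by ring, pow_add]; ring
      have hor := Nat.two_pow_add_eq_or_of_lt hlt a
      simp only [List.getD_cons_zero, Nat.add_sub_cancel, Nat.sub_zero]
      calc a * 8 ^ (t.length + 1) ||| d * 2 ^ (3 * t.length)
          = 2 ^ (3 * (t.length + 1)) * a ||| d * 2 ^ (3 * t.length) := by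
            rw [show (8:Nat) ^ (t.length+1) = 2 ^ (3*(t.length+1)) by
              rw [show (8 : Nat) = 2 ^ 3 from rfl, ← pow_mul], Nat.mul_comm]
        _ = 2 ^ (3 * (t.length + 1)) * a + d * 2 ^ (3 * t.length) := hor.symm
        _ = (a * 8 + d) * 8 ^ t.length := by
            rw [show 3 * (t.length + 1) = 3 * t.length + 3 by ring, pow_add, h8]; ring
    rw [hstep]
    have hmap : ((List.range t.length).map
        ((fun i => (d :: t).getD i 0 * 2 ^ (3 * (t.length + 1 - 1 - i))) ∘ Nat.succ))
        = (List.range t.length).map (fun i => t.getD i 0 * 2 ^ (3 * (t.length - 1 - i))) := by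
      apply List.map_congr_left
      intro i hi
      simp [Function.comp]
      omega
    rw [hmap]
    exact ih hbt (a * 8 + d)

-- A's helper on a list of casted small Nats computes the Horner value
theorem pvToDecimal_cast (ns : List Nat) (hb : ∀ d ∈ ns, d < 8) :
    pvToDecimal (ns.map (fun (v : Nat) => (v : Int)))
      = ((ns.foldl (fun r v => r * 8 + v) 0 : Nat) : Int) := by
  unfold pvToDecimal
  simp only [List.length_map]
  rw [PySem.List.pyRange_zero_natCast, List.map_map]
  refine Eq.trans (congrArg (fun l => List.foldl (fun dec i => PySem.Int.bor dec i) 0 l)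
    (List.map_congr_left
      (g := fun (k : Nat) => ((ns.getD k 0 * 2 ^ (3 * (ns.length - 1 - k)) : Nat) : Int)) ?_)) ?_
  · intro k hk
    have hk' : k < ns.length := List.mem_range.mp hk
    simp only [Function.comp, PySem.List.pyGetD_natCast]
    have hgd : (ns.map (fun (v : Nat) => (v : Int))).getD k 0 = ((ns.getD k 0 : Nat) : Int) := by
      rw [List.getD_eq_getElem?_getD, List.getD_eq_getElem?_getD, List.getElem?_map]
      simp [List.getElem?_eq_getElem hk']
    rw [hgd, Int.shiftLeft_eq]
    rw [show ((((ns.length : Int)) - (k : Int) - 1) * 3).toNat = 3 * (ns.length - 1 - k) by omega]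
    push_cast
    ring
  · have h := pv_orfold_cast
      ((List.range ns.length).map (fun k => ns.getD k 0 * 2 ^ (3 * (ns.length - 1 - k)))) 0
    rw [Nat.cast_zero] at h
    rw [List.map_map] at h
    have k0 := pv_key ns hb 0
    rw [Nat.zero_mul] at k0
    exact h.trans (congrArg (fun (n : Nat) => (n : Int)) k0)

-- ===== VERDICT (by name: the statement is the Claim_ definition above) =====
theorem TextToDecimal_spec : Claim_equal_TextToDecimal := by
  intro text _ _
  unfold Spec_TextToDecimal TextToDecimal TextToDecimal_alt
  simp only [PySem.List.foldl_append_singleton_eq_map, List.nil_append]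
  have hdig : (PySem.Chars.lower text.toList).map pvCharVal
      = ((PySem.Chars.lower text.toList).map pvCharValN).map (fun (v : Nat) => (v : Int)) := by
    rw [List.map_map]
    exact List.map_congr_left (fun c _ => pvCharVal_eq_cast c)
  have hb : ∀ d ∈ (PySem.Chars.lower text.toList).map pvCharValN, d < 8 := by
    intro d hd
    rcases List.mem_map.mp hd with ⟨c, _, rfl⟩
    exact pvCharValN_lt c
  rw [hdig, pvToDecimal_cast _ hb]
  have hB := pv_alt_fold (PySem.Chars.lower text.toList) 0
  rw [Nat.cast_zero] at hB
  rw [hB]
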